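-- pv_equiv track=rewrite | github.com/MysterionRise/ctf-dangerzone | tfc2024/genetics/solve.py | dna_to_ascii
-- ===== SOURCE A (Python) =====
-- def dna_to_ascii(dna_sequence):
--     mapping = {'A': '00', 'C': '01', 'G': '10', 'T': '11'}
--     dna_sequence = dna_sequence.replace(" ", "").replace("\n", "")
--     binary_sequence = ''.join(mapping[base] for base in dna_sequence)
--
--     def binary_to_ascii(binary_str):
--         return ''.join(chr(int(binary_str[i:i + 8], 2)) for i in
--                        range(0, len(binary_str), 8))
--
--     return binary_to_ascii(binary_sequence)
-- ===== SOURCE B (Python) =====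
-- def dna_to_ascii(dna_sequence):
--     # Single pass with an integer accumulator: no intermediate binary string, no slicing.
--     digit = {'A': 0, 'C': 1, 'G': 2, 'T': 3}
--     out = []
--     acc = 0
--     bits = 0
--     for base in dna_sequence:
--         if base == ' ' or base == '\n':
--             continue
--         acc = acc * 4 + digit[base]
--         bits += 2
--         if bits == 8:
--             out.append(chr(acc))
--             acc = 0
--             bits = 0
--     if bits > 0:
--         out.append(chr(acc))
--     return ''.join(out)
-- ===== Notes on version B (the rewrite author's own statement) =====
-- stated objective: alternative
-- what changed: B replaces A's intermediate binary string (join of 2-bit codes) and its slice-and-reparse chunk loop with a single pass over the bases keeping an integer accumulator and a bit counter, emitting a character every 8 bits.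
import Mathlib
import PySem

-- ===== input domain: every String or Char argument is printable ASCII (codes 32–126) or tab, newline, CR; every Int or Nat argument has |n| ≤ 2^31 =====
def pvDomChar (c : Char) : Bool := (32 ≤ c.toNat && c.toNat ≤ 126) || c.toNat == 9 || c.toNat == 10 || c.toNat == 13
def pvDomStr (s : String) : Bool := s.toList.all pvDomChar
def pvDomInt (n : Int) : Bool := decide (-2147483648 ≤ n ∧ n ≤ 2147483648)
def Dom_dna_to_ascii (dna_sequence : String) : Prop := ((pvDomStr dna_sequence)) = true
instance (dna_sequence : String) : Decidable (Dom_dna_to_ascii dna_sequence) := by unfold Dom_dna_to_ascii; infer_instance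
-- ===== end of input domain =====

-- B drops A's intermediate binary string and slice/int reparse for a single accumulator pass; return values proved equal.

-- ===== PORT A =====
-- mapping[base]; any non-nucleotide base raises KeyError in Python (excluded by Pre_), here it yields []
def pvMap2 (c : Char) : List Char :=
  if c = 'A' then ['0', '0'] else if c = 'C' then ['0', '1']
  else if c = 'G' then ['1', '0'] else if c = 'T' then ['1', '1'] else []

-- int(binary_str, 2) on a chunk of '0'/'1' characters
def pvBinVal (l : List Char) : Nat :=
  l.foldl (fun a c => 2 * a + (if c = '1' then 1 else 0)) 0

-- the generator: one chr(int(binary_str[i:i+8], 2)) per 8-character slice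
def pvChunks (l : List Char) : List Char :=
  match l with
  | [] => []
  | c :: rest =>
      Char.ofNat (pvBinVal ((c :: rest).take 8)) :: pvChunks ((c :: rest).drop 8)
  termination_by l.length
  decreasing_by simp

def dna_to_ascii (dna_sequence : String) : String :=
  let stripped := PySem.Str.replace (PySem.Str.replace dna_sequence " " "") "\n" ""
  let binary_sequence := stripped.toList.flatMap pvMap2
  String.mk (pvChunks binary_sequence)

-- ===== PORT B =====
-- digit[base]; any non-nucleotide base raises KeyError in Python (excluded by Pre_), here it yields 3
def pvDigit (c : Char) : Nat :=
  if c = 'A' then 0 else if c = 'C' then 1 else if c = 'G' then 2 else 3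

-- the loop body: state (out, acc, bits)
def pvStep (st : List Char × Nat × Nat) (c : Char) : List Char × Nat × Nat :=
  if c = ' ' ∨ c = '\n' then st
  else
    let acc := st.2.1 * 4 + pvDigit c
    let bits := st.2.2 + 2
    if bits = 8 then (st.1 ++ [Char.ofNat acc], 0, 0) else (st.1, acc, bits)

-- the trailing `if bits > 0` plus the final join
def pvFinish (st : List Char × Nat × Nat) : List Char :=
  if st.2.2 > 0 then st.1 ++ [Char.ofNat st.2.1] else st.1

def dna_to_ascii_alt (dna_sequence : String) : String :=
  String.mk (pvFinish (dna_sequence.toList.foldl pvStep ([], 0, 0)))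

-- ===== PRECONDITION & SPEC =====
-- Pre_ excludes exactly the inputs on which Python A raises KeyError: a character that is
-- neither one of the four nucleotide letters nor one of the two stripped whitespace characters.
def Pre_dna_to_ascii (dna_sequence : String) : Prop :=
  (dna_sequence.toList.all fun c =>
    c == ' ' || c == '\n' || c == 'A' || c == 'C' || c == 'G' || c == 'T') = true
instance (dna_sequence : String) : Decidable (Pre_dna_to_ascii dna_sequence) := by
  unfold Pre_dna_to_ascii; infer_instance

def pvWitness_dna_to_ascii : String := "ACGT TGC\nA"

def Spec_dna_to_ascii (dna_sequence : String) (out : String) : Prop := out = dna_to_ascii_alt dna_sequence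
instance (dna_sequence : String) (out : String) : Decidable (Spec_dna_to_ascii dna_sequence out) := by unfold Spec_dna_to_ascii; infer_instance

-- ===== CLAIM (what is proved, stated in full; the proofs are below) =====
def Claim_equal_dna_to_ascii : Prop := ∀ (dna_sequence : String), Dom_dna_to_ascii dna_sequence → Pre_dna_to_ascii dna_sequence → Spec_dna_to_ascii dna_sequence (dna_to_ascii dna_sequence)

-- ===== LEMMAS AND PROOFS =====

theorem pvChunksNil : pvChunks [] = [] := by rw [pvChunks.eq_def]

theorem pvChunksCons (c : Char) (rest : List Char) :
    pvChunks (c :: rest)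
      = Char.ofNat (pvBinVal ((c :: rest).take 8)) :: pvChunks ((c :: rest).drop 8) := by
  rw [pvChunks.eq_def]

-- s.replace(c, "") removes every occurrence of the single character c
theorem pvReplaceGoSingle (ch : Char) :
    ∀ (fuel : Nat) (l acc : List Char), l.length ≤ fuel →
      PySem.Chars.replace.go [ch] [] fuel l acc = acc.reverse ++ l.filter (· ≠ ch) := by
  intro fuel
  induction fuel with
  | zero => intro l acc h; simp at h; subst h; simp [PySem.Chars.replace.go]
  | succ n ih =>
    intro l acc h
    cases l with
    | nil => simp [PySem.Chars.replace.go]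
    | cons c t =>
      simp only [PySem.Chars.replace.go]
      by_cases hc : c = ch
      · subst hc
        have hp : List.isPrefixOf [c] (c :: t) = true := by simp [List.isPrefixOf]
        simp only [hp, if_pos]
        rw [ih _ _ (by simp at h ⊢; omega)]
        simp
      · have hp : List.isPrefixOf [ch] (c :: t) = false := by
          simp [List.isPrefixOf]; exact fun hh => (hc hh.symm).elim
        simp only [hp]
        rw [ih t (c :: acc) (by simp at h ⊢; omega)]
        simp [hc]

theorem pvReplaceSingle (ch : Char) (s : List Char) :
    PySem.Chars.replace s [ch] [] = s.filter (· ≠ ch) := by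
  simp [PySem.Chars.replace, pvReplaceGoSingle ch s.length s [] le_rfl]

-- value of a prefix extended by one base's 2-bit code
theorem pvBinValAppend (c : Char) (hc : c = 'A' ∨ c = 'C' ∨ c = 'G' ∨ c = 'T')
    (pre : List Char) :
    pvBinVal (pre ++ pvMap2 c) = pvBinVal pre * 4 + pvDigit c := by
  rcases hc with h | h | h | h <;> subst h <;>
    simp [pvBinVal, pvMap2, pvDigit, List.foldl_append] <;> ring

theorem pvMap2Len (c : Char) (hc : c = 'A' ∨ c = 'C' ∨ c = 'G' ∨ c = 'T') :
    (pvMap2 c).length = 2 := by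
  rcases hc with h | h | h | h <;> subst h <;> simp [pvMap2]

-- peeling one full 8-character chunk
theorem pvChunksStep (hd rest : List Char) (h : hd.length = 8) :
    pvChunks (hd ++ rest) = Char.ofNat (pvBinVal hd) :: pvChunks rest := by
  cases hd with
  | nil => simp at h
  | cons c t =>
    rw [List.cons_append, pvChunksCons]
    rw [show (c :: (t ++ rest)) = (c :: t) ++ rest from rfl]
    rw [← h, List.take_left, List.drop_left]

-- main invariant: A's chunking of the remaining binary string matches B's fold state
theorem pvMain :
    ∀ (l : List Char), (∀ c ∈ l, c = 'A' ∨ c = 'C' ∨ c = 'G' ∨ c = 'T') →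
    ∀ (out pre : List Char),
      (pre.length = 0 ∨ pre.length = 2 ∨ pre.length = 4 ∨ pre.length = 6) →
      out ++ pvChunks (pre ++ l.flatMap pvMap2) =
        pvFinish (l.foldl pvStep (out, pvBinVal pre, pre.length)) := by
  intro l
  induction l with
  | nil =>
    intro _ out pre hpre
    cases pre with
    | nil =>
      rw [List.flatMap_nil, List.append_nil, List.foldl_nil, pvChunksNil]
      simp [pvFinish]
    | cons c t =>
      have hlen : (c :: t).length < 8 := by rcases hpre with h | h | h | h <;> omega
      simp only [List.flatMap_nil, List.append_nil, List.foldl_nil]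
      rw [pvChunksCons]
      rw [List.take_of_length_le (by omega), List.drop_eq_nil_of_le (by omega)]
      rw [pvChunksNil]
      simp [pvFinish]
  | cons c l ih =>
    intro hall out pre hpre
    have hc : c = 'A' ∨ c = 'C' ∨ c = 'G' ∨ c = 'T' := hall c (by simp)
    have hrest : ∀ x ∈ l, x = 'A' ∨ x = 'C' ∨ x = 'G' ∨ x = 'T' := fun x hx => hall x (by simp [hx])
    have hns : ¬ (c = ' ' ∨ c = '\n') := by rcases hc with h | h | h | h <;> subst h <;> decide
    have hval := pvBinValAppend c hc pre
    have hlen2 : (pre ++ pvMap2 c).length = pre.length + 2 := by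
      simp [pvMap2Len c hc]
    simp only [List.flatMap_cons, List.foldl_cons, ← List.append_assoc]
    by_cases h8 : pre.length + 2 = 8
    · have hstep : pvStep (out, pvBinVal pre, pre.length) c
          = (out ++ [Char.ofNat (pvBinVal (pre ++ pvMap2 c))], 0, 0) := by
        simp only [pvStep, if_neg hns]
        rw [if_pos h8, hval]
      rw [hstep, pvChunksStep (pre ++ pvMap2 c) _ (by omega)]
      have := ih hrest (out ++ [Char.ofNat (pvBinVal (pre ++ pvMap2 c))]) [] (by simp)
      simp only [List.nil_append, List.length_nil] at this
      rw [show pvBinVal [] = 0 from rfl] at this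
      rw [← this]
      simp
    · have hstep : pvStep (out, pvBinVal pre, pre.length) c
          = (out, pvBinVal (pre ++ pvMap2 c), (pre ++ pvMap2 c).length) := by
        simp only [pvStep, if_neg hns]
        rw [if_neg h8, hval, hlen2]
      rw [hstep]
      exact ih hrest out (pre ++ pvMap2 c)
        (by rw [hlen2]; rcases hpre with h | h | h | h <;> omega)

-- skipping spaces/newlines in the fold equals folding over the filtered list
theorem pvFoldFilter :
    ∀ (l : List Char) (st : List Char × Nat × Nat),
      l.foldl pvStep st = (l.filter (fun c => !(c == ' ' || c == '\n'))).foldl pvStep st := by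
  intro l
  induction l with
  | nil => intro st; rfl
  | cons c t ih =>
    intro st
    by_cases h : c = ' ' ∨ c = '\n'
    · have hid : pvStep st c = st := by rw [pvStep, if_pos h]
      rcases h with h | h <;> subst h <;>
        simp only [List.foldl_cons, hid, List.filter_cons] <;> simpa using ih st
    · have h1 : c ≠ ' ' := fun e => h (Or.inl e)
      have h2 : c ≠ '\n' := fun e => h (Or.inr e)
      simp only [List.foldl_cons, List.filter_cons]
      simpa [h1, h2] using ih (pvStep st c)

-- A's two one-character replaces remove exactly the characters B's loop skips
theorem pvFilterMerge (l : List Char) :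
    (l.filter (· ≠ ' ')).filter (· ≠ '\n') = l.filter (fun c => !(c == ' ' || c == '\n')) := by
  rw [List.filter_filter]
  apply List.filter_congr
  intro c _
  by_cases h1 : c = ' ' <;> by_cases h2 : c = '\n' <;> simp [h1, h2]

-- ===== VERDICT (by name: the statement is the Claim_ definition above) =====
theorem dna_to_ascii_spec : Claim_equal_dna_to_ascii := by
  intro s _ hpre
  unfold Spec_dna_to_ascii dna_to_ascii dna_to_ascii_alt
  dsimp only
  have hstrip :
      (PySem.Str.replace (PySem.Str.replace s " " "") "\n" "").toList
        = s.toList.filter (fun c => !(c == ' ' || c == '\n')) := by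
    rw [PySem.Str.toList_replace, PySem.Str.toList_replace]
    rw [show (" " : String).toList = [' '] from by decide,
        show ("\n" : String).toList = ['\n'] from by decide,
        show ("" : String).toList = [] from by decide]
    rw [pvReplaceSingle, pvReplaceSingle, pvFilterMerge]
  have hall : ∀ c ∈ s.toList.filter (fun c => !(c == ' ' || c == '\n')),
      c = 'A' ∨ c = 'C' ∨ c = 'G' ∨ c = 'T' := by
    intro c hcmem
    rw [List.mem_filter] at hcmem
    have h1 := (List.all_eq_true.mp hpre) c hcmem.1
    have h2 := hcmem.2
    simp only [Bool.or_eq_true, beq_iff_eq] at h1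
    simp only [Bool.or_eq_false_iff, Bool.not_eq_true', beq_eq_false_iff_ne, ne_eq] at h2
    rcases h1 with ((((h | h) | h) | h) | h) | h
    · exact absurd h h2.1
    · exact absurd h h2.2
    · exact Or.inl h
    · exact Or.inr (Or.inl h)
    · exact Or.inr (Or.inr (Or.inl h))
    · exact Or.inr (Or.inr (Or.inr h))
  have hmain := pvMain _ hall [] [] (by simp)
  simp only [List.nil_append, List.length_nil] at hmain
  rw [show pvBinVal [] = 0 from rfl] at hmain
  rw [hstrip, pvFoldFilter, hmain]
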